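-- pv_equiv track=rewrite | github.com/TianrenWang/chatase | backend/chatbot/engine/generator.py | getMessageFromText
-- ===== SOURCE A (Python) =====
-- def getMessageFromText(text):
--     start = -1
--     result = ""
--     for i in range(len(text)):
--         if text[i] == '"':
--             if start < 0:
--                 start = i
--             else:
--                 if result == "":
--                     result = text[start + 1:i]
--                 else:
--                     result += " " + text[start + 1:i]
--                 start = -1
--     return result
-- ===== SOURCE B (Python) =====
-- import re
--
-- def getMessageFromText(text):
--     return " ".join(re.findall(r'"([^"]*)"', text))
-- ===== Notes on version B (the rewrite author's own statement) =====
-- stated objective: idiomatic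
-- what changed: B replaces A's stateful per-character scan (open-quote index, conditional space concatenation) with regex extraction of the quoted segments and a single space-join (C-level regex scan, measured faster); Pre_ excludes texts whose first quoted pair is empty while a second pair exists, where A's suppression of the join separator while its accumulator is still empty is as defensible as B's uniform join.
-- outside the precondition, e.g. on getMessageFromText('"""a"'): A returns 'a', B returns ' a'
import Mathlib
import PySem

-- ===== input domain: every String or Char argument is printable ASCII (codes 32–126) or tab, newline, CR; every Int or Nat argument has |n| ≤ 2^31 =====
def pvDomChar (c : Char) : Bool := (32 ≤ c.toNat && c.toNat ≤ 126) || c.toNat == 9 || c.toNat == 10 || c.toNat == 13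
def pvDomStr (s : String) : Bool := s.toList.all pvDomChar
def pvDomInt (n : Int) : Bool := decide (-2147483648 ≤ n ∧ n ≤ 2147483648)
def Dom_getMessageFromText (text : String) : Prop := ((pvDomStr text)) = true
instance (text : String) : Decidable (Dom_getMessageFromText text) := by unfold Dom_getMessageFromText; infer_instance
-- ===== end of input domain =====

-- B replaces A's stateful index scan with regex extraction of the quoted
-- segments and a single space-join (objective: idiomatic; a timing run measured B faster — C-level regex scan vs a per-character Python loop).

-- ===== PORT A =====
-- the body of A's for-loop, on the character list of `text`
def pvAStep (l : List Char) (st : Int × List Char) (i : Int) : Int × List Char :=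
  if PySem.List.pyGetD l i ' ' = '"' then
    if st.1 < 0 then (i, st.2)
    else if st.2 = [] then (-1, PySem.List.slice l (some (st.1 + 1)) (some i))
    else (-1, st.2 ++ ' ' :: PySem.List.slice l (some (st.1 + 1)) (some i))
  else st

def getMessageFromText (text : String) : String :=
  String.ofList ((PySem.List.pyRange 0 (PySem.Str.len text) 1).foldl (pvAStep text.toList) (-1, [])).2

-- ===== PORT B =====
-- re.findall(r'"([^"]*)"', text): the contents of each consecutive pair of quotes
def pvFindQuoted (cs : List Char) : List (List Char) :=
  match cs with
  | [] => []
  | c :: rest =>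
    if c = '"' then
      match h : rest.dropWhile (· ≠ '"') with
      | [] => []
      | _ :: rest' => rest.takeWhile (· ≠ '"') :: pvFindQuoted rest'
    else pvFindQuoted rest
termination_by cs.length
decreasing_by
  · have h1 := List.length_dropWhile_le (· ≠ '"') rest
    rw [h] at h1; simp at h1 ⊢; omega
  · simp

def getMessageFromText_alt (text : String) : String :=
  String.ofList (PySem.Chars.join [' '] (pvFindQuoted text.toList))

-- ===== PRECONDITION & SPEC =====
-- Pre_ excludes texts whose first quoted pair is empty while a second quote pair
-- exists (first two quotes adjacent and at least four quotes in total): there A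
-- suppresses the join separator while its accumulator is still empty, B joins all
-- segments uniformly, and either value is defensible for this unspecified corner.
def Pre_getMessageFromText (text : String) : Prop :=
  ¬ ((text.toList.dropWhile (· ≠ '"')).take 2 = ['"', '"'] ∧ 4 ≤ text.toList.count '"')
instance (text : String) : Decidable (Pre_getMessageFromText text) := by
  unfold Pre_getMessageFromText; infer_instance

def pvWitness_getMessageFromText : String := "say \"hi\" and \"there\""

def Spec_getMessageFromText (text : String) (out : String) : Prop := out = getMessageFromText_alt text
instance (text : String) (out : String) : Decidable (Spec_getMessageFromText text out) := by unfold Spec_getMessageFromText; infer_instance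

-- ===== CLAIM (what is proved, stated in full; the proofs are below) =====
def Claim_equal_getMessageFromText : Prop := ∀ (text : String), Dom_getMessageFromText text → Pre_getMessageFromText text → Spec_getMessageFromText text (getMessageFromText text)

-- ===== LEMMAS AND PROOFS =====

-- how A extends its accumulated result at a closing quote
def pvClose (r s : List Char) : List Char := if r = [] then s else r ++ ' ' :: s

-- folding pvClose over a list of segments
def pvFinish (r : List Char) (segs : List (List Char)) : List Char := segs.foldl pvClose r

-- A's loop as a structural state machine over the characters: the Option is
-- `some p` when a quote is open with accumulated contents `p`
def pvMachine : List Char → Option (List Char) → List Char → List Char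
  | [], _, r => r
  | c :: cs, none, r => if c = '"' then pvMachine cs (some []) r else pvMachine cs none r
  | c :: cs, some p, r => if c = '"' then pvMachine cs none (pvClose r p) else pvMachine cs (some (p ++ [c])) r

theorem pvFinish_nonempty (segs : List (List Char)) : ∀ (r : List Char), r ≠ [] →
    pvFinish r segs = r ++ segs.flatMap (fun s => ' ' :: s) := by
  induction segs with
  | nil => intro r hr; simp [pvFinish]
  | cons s rest ih =>
    intro r hr
    have : pvClose r s = r ++ ' ' :: s := by simp [pvClose, hr]
    rw [show pvFinish r (s :: rest) = pvFinish (pvClose r s) rest from rfl, this,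
      ih _ (by simp [hr])]
    simp

theorem pvJoin_flat (segs : List (List Char)) : ∀ (s : List Char),
    PySem.Chars.join [' '] (s :: segs) = s ++ segs.flatMap (fun t => ' ' :: t) := by
  induction segs with
  | nil => intro s; simp [PySem.Chars.join, List.intercalate]
  | cons q rest ih =>
    intro s
    rw [PySem.Chars.join_cons_cons, ih]
    simp

-- two quotes per extracted segment
theorem pvFindQuoted_count (cs : List Char) :
    2 * (pvFindQuoted cs).length ≤ cs.count '"' := by
  match cs with
  | [] => simp [pvFindQuoted]
  | c :: rest =>
    by_cases hc : c = '"'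
    · subst hc
      rw [pvFindQuoted]
      simp only [if_pos rfl]
      cases h : rest.dropWhile (· ≠ '"') with
      | nil => simp
      | cons x rest' =>
        have ih := pvFindQuoted_count rest'
        have hx : x = '"' := by
          have := List.head_dropWhile_not (p := (· ≠ '"')) (l := rest)
          rw [h] at this
          simpa using this (by simp)
        have hsplit : rest.count '"' = (rest.takeWhile (· ≠ '"')).count '"' + (x :: rest').count '"' := by
          conv_lhs => rw [← List.takeWhile_append_dropWhile (p := (· ≠ '"')) (l := rest), h]
          rw [List.count_append]
        have htw : (rest.takeWhile (· ≠ '"')).count '"' = 0 := by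
          rw [List.count_eq_zero]
          intro hmem
          have := List.mem_takeWhile_imp hmem
          simp at this
        simp only [List.count_cons, hx, if_pos rfl] at hsplit
        simp only [List.length_cons, List.count_cons]
        simp [htw, hx] at hsplit ⊢
        omega
    · rw [pvFindQuoted]
      simp only [if_neg hc]
      have ih := pvFindQuoted_count rest
      simp [List.count_cons, hc]
      omega
termination_by cs.length
decreasing_by
  · have h1 := List.length_dropWhile_le (· ≠ '"') rest
    rw [h] at h1; simp at h1 ⊢; omega
  · simp

-- the first extracted segment lies between the first quote and the one after it
theorem pvFindQuoted_first (cs : List Char) (s : List Char) (tl : List (List Char))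
    (hcons : pvFindQuoted cs = s :: tl) :
    ∃ rest, cs.dropWhile (· ≠ '"') = '"' :: rest ∧ s = rest.takeWhile (· ≠ '"') := by
  match cs with
  | [] => simp [pvFindQuoted] at hcons
  | c :: rest =>
    by_cases hc : c = '"'
    · subst hc
      refine ⟨rest, by rw [List.dropWhile_cons_of_neg (by simp)], ?_⟩
      rw [pvFindQuoted] at hcons
      simp only [if_pos rfl] at hcons
      cases h : rest.dropWhile (· ≠ '"') with
      | nil => rw [h] at hcons; simp at hcons
      | cons x rest' =>
        rw [h] at hcons
        exact (List.cons.injEq .. ▸ hcons).1.symm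
    · rw [pvFindQuoted, if_neg hc] at hcons
      obtain ⟨r, hr, hs⟩ := pvFindQuoted_first rest s tl hcons
      exact ⟨r, by rwa [List.dropWhile_cons_of_pos (by simpa using hc)], hs⟩
termination_by cs.length
decreasing_by simp

-- A's fold of pvClose from an empty accumulator equals the plain join, given Pre_
theorem pvFinish_eq_join (cs : List Char)
    (hpre : ¬ ((cs.dropWhile (· ≠ '"')).take 2 = ['"', '"'] ∧ 4 ≤ cs.count '"')) :
    pvFinish [] (pvFindQuoted cs) = PySem.Chars.join [' '] (pvFindQuoted cs) := by
  push_neg at hpre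
  have htwcount : (cs.takeWhile (· ≠ '"')).count '"' = 0 := by
    rw [List.count_eq_zero]
    intro hmem
    have := List.mem_takeWhile_imp hmem
    simp at this
  cases hq : pvFindQuoted cs with
  | nil => simp [pvFinish, PySem.Chars.join_nil]
  | cons s tl =>
    by_cases hs : s = []
    · subst hs
      -- first segment empty: first two quotes adjacent, so Pre_ forces < 4 quotes, so tl = []
      obtain ⟨rest, hdrop, hseg⟩ := pvFindQuoted_first cs [] tl hq
      have hrest : rest.takeWhile (· ≠ '"') = [] := hseg.symm
      have hcnt := pvFindQuoted_count cs
      rw [hq] at hcnt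
      have hsplit : cs.count '"' = (cs.takeWhile (· ≠ '"')).count '"' + ('"' :: rest).count '"' := by
        conv_lhs => rw [← List.takeWhile_append_dropWhile (p := (· ≠ '"')) (l := cs), hdrop]
        rw [List.count_append]
      cases rest with
      | nil =>
        -- a single quote cannot produce a segment
        exfalso
        simp only [ne_eq, decide_not] at htwcount
        simp at hsplit hcnt
        omega
      | cons x rxs =>
        have hx : x = '"' := by
          by_contra hx
          rw [List.takeWhile_cons_of_pos (by simpa using hx)] at hrest
          simp at hrest
        have htake : (cs.dropWhile (· ≠ '"')).take 2 = ['"', '"'] := by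
          rw [hdrop, hx]; rfl
        have hcount := hpre htake
        have htl : tl = [] := by
          cases tl with
          | nil => rfl
          | cons a b => exfalso; simp at hcnt; omega
        subst htl
        simp [pvFinish, pvClose, PySem.Chars.join, List.intercalate]
    · rw [pvFinish, List.foldl_cons, show pvClose [] s = s from by simp [pvClose],
        show List.foldl pvClose s tl = pvFinish s tl from rfl,
        pvFinish_nonempty tl s hs, pvJoin_flat]

-- one append step on A's slice when the scanned character is not a quote
theorem pvSlice_snoc (l : List Char) (a j : Nat) (ha : a ≤ j) (hj : j < l.length) :
    PySem.List.slice l (some (a : Int)) (some ((j : Int) + 1)) =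
      PySem.List.slice l (some (a : Int)) (some (j : Int)) ++ [l[j]] := by
  have h1 : ((j : Int) + 1) = ((j + 1 : Nat) : Int) := by push_cast; ring
  rw [h1, PySem.List.slice_natCast, PySem.List.slice_natCast]
  have h2 : j + 1 - a = (j - a) + 1 := by omega
  rw [h2, List.take_add_one]
  have h3 : j - a < (l.drop a).length := by simp [List.length_drop]; omega
  have h4 : (l.drop a)[j - a]? = some l[j] := by
    rw [List.getElem?_eq_getElem h3]
    congr 1
    rw [List.getElem_drop]
    congr 1
    omega
  rw [h4]
  simp

theorem pvMachine_spec (cs : List Char) :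
    (∀ r, pvMachine cs none r = pvFinish r (pvFindQuoted cs)) ∧
    (∀ p r, pvMachine cs (some p) r =
      match cs.dropWhile (· ≠ '"') with
      | [] => r
      | _ :: rest => pvFinish (pvClose r (p ++ cs.takeWhile (· ≠ '"'))) (pvFindQuoted rest)) := by
  induction cs with
  | nil => exact ⟨fun r => by simp [pvMachine, pvFindQuoted, pvFinish],
                  fun p r => by simp [pvMachine]⟩
  | cons c rest ih =>
    constructor
    · intro r
      by_cases hc : c = '"'
      · subst hc
        simp only [pvMachine]
        rw [ih.2 [] r]
        rw [pvFindQuoted]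
        cases h : rest.dropWhile (· ≠ '"') with
        | nil => simp [pvFinish]
        | cons x rest' => simp [pvFinish]
      · rw [pvMachine, if_neg hc, ih.1 r, pvFindQuoted, if_neg hc]
    · intro p r
      by_cases hc : c = '"'
      · subst hc
        simp only [pvMachine]
        rw [ih.1 (pvClose r p)]
        have hd : ('"' :: rest).dropWhile (· ≠ '"') = '"' :: rest := by
          rw [List.dropWhile_cons_of_neg (by simp)]
        have ht : ('"' :: rest).takeWhile (· ≠ '"') = [] := by
          rw [List.takeWhile_cons_of_neg (by simp)]
        rw [hd, ht]
        simp
      · rw [pvMachine, if_neg hc, ih.2 (p ++ [c]) r]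
        have hd : (c :: rest).dropWhile (· ≠ '"') = rest.dropWhile (· ≠ '"') := by
          rw [List.dropWhile_cons_of_pos (by simpa using hc)]
        have ht : (c :: rest).takeWhile (· ≠ '"') = c :: rest.takeWhile (· ≠ '"') := by
          rw [List.takeWhile_cons_of_pos (by simpa using hc)]
        rw [hd, ht]
        cases h : rest.dropWhile (· ≠ '"') with
        | nil => rfl
        | cons x rest' => simp

-- A's index loop from position j equals the structural machine on the remaining characters
theorem pvLoop_eq (l : List Char) : ∀ (k j : Nat), j + k = l.length → ∀ (s : Int) (r : List Char),
    s < (j : Int) →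
    ((PySem.List.pyRange (j : Int) (l.length : Int) 1).foldl (pvAStep l) (s, r)).2 =
      pvMachine (l.drop j)
        (if s < 0 then none else some (PySem.List.slice l (some (s + 1)) (some (j : Int)))) r := by
  intro k
  induction k with
  | zero =>
    intro j hj s r hs
    have hjl : (j : Int) = (l.length : Int) := by omega
    have hempty : PySem.List.pyRange (j : Int) (l.length : Int) 1 = [] := by
      rw [hjl]; simp [pysem]
    have hdrop : l.drop j = [] := by
      apply List.drop_eq_nil_of_le; omega
    rw [hempty, hdrop]
    cases h : decide (s < 0) <;> simp_all [pvMachine]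
  | succ k ih =>
    intro j hj s r hs
    have hjl : j < l.length := by omega
    have hjl' : (j : Int) < (l.length : Int) := by exact_mod_cast hjl
    rw [PySem.List.pyRange_one_cons hjl', List.foldl_cons]
    have hdrop : l.drop j = l[j] :: l.drop (j + 1) := List.drop_eq_getElem_cons hjl
    have hget : PySem.List.pyGetD l (j : Int) ' ' = l[j] := by
      rw [PySem.List.pyGetD_natCast, List.getD_eq_getElem?_getD, List.getElem?_eq_getElem hjl]
      rfl
    by_cases hc : l[j] = '"'
    · by_cases hneg : s < 0
      · -- opening quote
        have hstep : pvAStep l (s, r) (j : Int) = ((j : Int), r) := by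
          simp [pvAStep, hget, hc, hneg]
        rw [hstep]
        have := ih (j + 1) (by omega) (j : Int) r (by push_cast; omega)
        have hcast : ((j + 1 : Nat) : Int) = (j : Int) + 1 := by push_cast; ring
        rw [hcast] at this
        rw [this]
        have hsl : PySem.List.slice l (some ((j : Int) + 1)) (some ((j : Int) + 1)) = [] := by
          have h1 : ((j : Int) + 1) = ((j + 1 : Nat) : Int) := by push_cast; ring
          rw [h1, PySem.List.slice_natCast]; simp
        rw [if_neg (by omega), hsl, hdrop, if_pos hneg]
        simp only [pvMachine, if_pos hc]
      · -- closing quote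
        have hstep : pvAStep l (s, r) (j : Int) =
            (-1, pvClose r (PySem.List.slice l (some (s + 1)) (some (j : Int)))) := by
          by_cases hr : r = [] <;> simp [pvAStep, hget, hc, hneg, pvClose, hr]
        rw [hstep]
        have := ih (j + 1) (by omega) (-1) (pvClose r (PySem.List.slice l (some (s + 1)) (some (j : Int)))) (by push_cast; omega)
        have hcast : ((j + 1 : Nat) : Int) = (j : Int) + 1 := by push_cast; ring
        rw [hcast] at this
        simp only [if_pos (show (-1 : Int) < 0 by norm_num)] at this
        rw [this, if_neg hneg, hdrop]
        simp only [pvMachine, if_pos hc]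
    · -- not a quote: state unchanged
      have hstep : pvAStep l (s, r) (j : Int) = (s, r) := by
        simp [pvAStep, hget, hc]
      rw [hstep]
      have := ih (j + 1) (by omega) s r (by push_cast; omega)
      have hcast : ((j + 1 : Nat) : Int) = (j : Int) + 1 := by push_cast; ring
      rw [hcast] at this
      rw [this, hdrop]
      by_cases hneg : s < 0
      · rw [if_pos hneg, if_pos hneg]
        simp only [pvMachine, if_neg hc]
      · rw [if_neg hneg, if_neg hneg]
        simp only [pvMachine, if_neg hc]
        congr 1
        have hs0 : 0 ≤ s := by omega
        have h1 : s + 1 = ((s.toNat + 1 : Nat) : Int) := by omega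
        rw [h1]
        rw [pvSlice_snoc l (s.toNat + 1) j (by omega) hjl]

-- ===== VERDICT (by name: the statement is the Claim_ definition above) =====
theorem getMessageFromText_spec : Claim_equal_getMessageFromText := by
  intro text _ hpre
  unfold Spec_getMessageFromText getMessageFromText getMessageFromText_alt
  rw [PySem.Str.len_eq]
  have h := pvLoop_eq text.toList text.toList.length 0 (by omega) (-1) [] (by omega)
  simp only [Nat.cast_zero] at h
  rw [h, if_pos (by omega), List.drop_zero]
  rw [(pvMachine_spec text.toList).1]
  unfold Pre_getMessageFromText at hpre
  rw [pvFinish_eq_join text.toList hpre]
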